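-- pv_equiv track=rewrite | github.com/satoooon8888/NITIC_CTF_2_challanges | web/password_fixed/work/server.py | fuzzy_equal
-- ===== SOURCE A (Python) =====
-- def fuzzy_equal(input_pass, password):
-- 	if len(input_pass) != len(password):
-- 		return False
--
-- 	for i in range(len(input_pass)):
-- 		if input_pass[i] in "0oO":
-- 			if password[i] not in "0oO":
-- 				return False
-- 			continue
-- 		if input_pass[i] in "l1I":
-- 			if password[i] not in "l1I":
-- 				return False
-- 			continue
-- 		if input_pass[i] != password[i]:
-- 			return False
-- 	return True
-- ===== SOURCE B (Python) =====
-- _TRANS = str.maketrans("0oO1lI", "000111")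
--
-- def fuzzy_equal(input_pass, password):
-- 	return input_pass.translate(_TRANS) == password.translate(_TRANS)
-- ===== Notes on version B (the rewrite author's own statement) =====
-- stated objective: idiomatic
-- what changed: Replaced the interleaved index loop with per-character class branching by a fixed translation table: both strings are normalized once and compared with a single equality test, which subsumes the length check.
import Mathlib
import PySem

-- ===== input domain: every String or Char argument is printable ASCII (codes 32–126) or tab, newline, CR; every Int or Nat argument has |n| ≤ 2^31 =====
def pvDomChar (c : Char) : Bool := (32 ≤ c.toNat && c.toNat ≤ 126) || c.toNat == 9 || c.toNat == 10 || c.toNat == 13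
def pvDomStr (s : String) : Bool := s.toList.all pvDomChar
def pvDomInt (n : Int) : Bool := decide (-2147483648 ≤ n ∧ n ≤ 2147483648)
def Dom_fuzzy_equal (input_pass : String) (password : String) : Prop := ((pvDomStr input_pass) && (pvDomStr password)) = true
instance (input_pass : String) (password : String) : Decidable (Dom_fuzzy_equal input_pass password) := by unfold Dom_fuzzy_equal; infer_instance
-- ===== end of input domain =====

-- B normalizes both strings with a fixed translation table and compares once (idiomatic); A's branching loop is ported literally.

-- ===== PORT A =====
-- membership tests `c in "0oO"` / `c in "l1I"` as Python evaluates them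
def pvIsZ (c : Char) : Bool := c == '0' || c == 'o' || c == 'O'
def pvIsL (c : Char) : Bool := c == 'l' || c == '1' || c == 'I'

-- the for-loop over i in range(len), walking both strings in step (lengths already equal)
def pvLoop : List Char → List Char → Bool
  | a :: as, b :: bs =>
    if pvIsZ a then
      if !pvIsZ b then false else pvLoop as bs
    else if pvIsL a then
      if !pvIsL b then false else pvLoop as bs
    else if a != b then false else pvLoop as bs
  | _, _ => true

def fuzzy_equal (input_pass : String) (password : String) : Bool :=
  if input_pass.toList.length != password.toList.length then false
  else pvLoop input_pass.toList password.toList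

-- ===== PORT B =====
-- the translation table: '0','o','O' → '0'; '1','l','I' → '1'
def pvCanon (c : Char) : Char :=
  if pvIsZ c then '0' else if pvIsL c then '1' else c

def fuzzy_equal_alt (input_pass : String) (password : String) : Bool :=
  input_pass.toList.map pvCanon == password.toList.map pvCanon

-- ===== PRECONDITION & SPEC =====
def Spec_fuzzy_equal (input_pass : String) (password : String) (out : Bool) : Prop := out = fuzzy_equal_alt input_pass password
instance (input_pass : String) (password : String) (out : Bool) : Decidable (Spec_fuzzy_equal input_pass password out) := by unfold Spec_fuzzy_equal; infer_instance

-- ===== CLAIM (what is proved, stated in full; the proofs are below) =====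
def Claim_equal_fuzzy_equal : Prop := ∀ (input_pass : String) (password : String), Dom_fuzzy_equal input_pass password → Spec_fuzzy_equal input_pass password (fuzzy_equal input_pass password)

-- ===== LEMMAS AND PROOFS =====

theorem pvCanon_beq (a b : Char) :
    (pvCanon a == pvCanon b) =
      (if pvIsZ a then pvIsZ b else if pvIsL a then pvIsL b else a == b) := by
  unfold pvCanon
  by_cases hza : pvIsZ a = true <;> by_cases hzb : pvIsZ b = true <;>
    by_cases hla : pvIsL a = true <;> by_cases hlb : pvIsL b = true <;>
      simp_all [pvIsZ, pvIsL, beq_eq_decide] <;> aesop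

theorem pvLoop_eq (as : List Char) : ∀ bs : List Char, as.length = bs.length →
    pvLoop as bs = (as.map pvCanon == bs.map pvCanon) := by
  induction as with
  | nil => intro bs h; cases bs <;> simp_all [pvLoop]
  | cons a as ih =>
    intro bs h
    cases bs with
    | nil => simp at h
    | cons b bs =>
      simp only [List.length_cons, Nat.add_right_cancel_iff] at h
      show pvLoop (a :: as) (b :: bs) = _
      unfold pvLoop
      simp only [List.map, List.cons_beq_cons, pvCanon_beq, ih bs h]
      by_cases hza : pvIsZ a = true <;> by_cases hla : pvIsL a = true <;>
        by_cases hzb : pvIsZ b = true <;> by_cases hlb : pvIsL b = true <;>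
          simp_all [bne, beq_eq_decide]

-- ===== VERDICT (by name: the statement is the Claim_ definition above) =====
theorem fuzzy_equal_spec : Claim_equal_fuzzy_equal := by
  intro s t _
  unfold Spec_fuzzy_equal fuzzy_equal fuzzy_equal_alt
  by_cases h : s.toList.length = t.toList.length
  · have hc : (s.toList.length != t.toList.length) = false := by simp [h]
    simp only [hc, Bool.false_eq_true, if_false]
    exact pvLoop_eq _ _ h
  · have hne : s.toList.map pvCanon ≠ t.toList.map pvCanon := by
      intro he
      exact h (by simpa using congrArg List.length he)
    have hc : (s.toList.length != t.toList.length) = true := by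
      simp only [bne_iff_ne, ne_eq]
      exact h
    simp only [hc, if_true, beq_eq_false_iff_ne.mpr hne]
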